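-- pv_equiv track=rewrite | github.com/carlosrs14/mintic-retos | Ciclo#1/Reto#5/Solución.py | intercambios
-- ===== SOURCE A (Python) =====
-- def intercambios (SUNO,SDOS):
--   a=0
--   b=0
--   for s in SUNO:
--     if s not in SDOS:
--       a=a+1
--   for i in SDOS:
--     if i not in SUNO:
--       b=b+1
--   if a<b:
--     return a
--   else:
--     return b
-- ===== SOURCE B (Python) =====
-- def intercambios(SUNO, SDOS):
--     c1 = {}
--     for s in SUNO:
--         c1[s] = c1.get(s, 0) + 1
--     c2 = {}
--     for s in SDOS:
--         c2[s] = c2.get(s, 0) + 1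
--     a = sum(v for k, v in c1.items() if k not in c2)
--     b = sum(v for k, v in c2.items() if k not in c1)
--     return a if a < b else b
-- ===== Notes on version B (the rewrite author's own statement) =====
-- stated objective: faster
-- what changed: Replaces A's two loops that test each element with a linear 'in' scan of the other list by two frequency dictionaries built once, summing the counts of keys absent from the other dict.
import Mathlib
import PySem

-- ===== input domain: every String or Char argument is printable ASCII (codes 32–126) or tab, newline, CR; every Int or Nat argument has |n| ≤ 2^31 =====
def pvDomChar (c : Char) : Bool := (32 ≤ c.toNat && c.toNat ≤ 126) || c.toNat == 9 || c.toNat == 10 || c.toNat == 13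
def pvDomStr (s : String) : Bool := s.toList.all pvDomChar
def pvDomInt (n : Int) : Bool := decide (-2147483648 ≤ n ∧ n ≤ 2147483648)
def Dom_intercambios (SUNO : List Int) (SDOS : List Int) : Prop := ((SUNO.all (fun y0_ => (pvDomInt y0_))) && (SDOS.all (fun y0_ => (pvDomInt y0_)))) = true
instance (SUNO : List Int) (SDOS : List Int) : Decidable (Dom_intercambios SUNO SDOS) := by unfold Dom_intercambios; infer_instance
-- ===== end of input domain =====

-- B replaces A's per-element linear membership scans (O(n·m)) by two frequency dictionaries
-- built once and summed over distinct keys (O(n+m) dict operations): faster, same values.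


-- ===== PORT A =====
-- a=0; for s in SUNO: if s not in SDOS: a+=1;  b likewise over SDOS;  return a if a<b else b
def intercambios (SUNO : List Int) (SDOS : List Int) : Int :=
  let a : Int := SUNO.foldl (fun a s => if !(SDOS.contains s) then a + 1 else a) 0
  let b : Int := SDOS.foldl (fun b i => if !(SUNO.contains i) then b + 1 else b) 0
  if a < b then a else b

-- ===== PORT B =====
-- c1, c2 : frequency dicts built with d[s] = d.get(s, 0) + 1; then sum the counts of
-- keys absent from the other dict; return the smaller sum.
def intercambios_alt (SUNO : List Int) (SDOS : List Int) : Int :=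
  let c1 := SUNO.foldl (fun d s => d.insert s (d.getD s 0 + 1)) PySem.Dict.empty
  let c2 := SDOS.foldl (fun d s => d.insert s (d.getD s 0 + 1)) PySem.Dict.empty
  let a : Int := ((c1.items.filter (fun p => !(c2.contains p.1))).map (·.2)).sum
  let b : Int := ((c2.items.filter (fun p => !(c1.contains p.1))).map (·.2)).sum
  if a < b then a else b

-- ===== PRECONDITION & SPEC =====
def Spec_intercambios (SUNO : List Int) (SDOS : List Int) (out : Int) : Prop := out = intercambios_alt SUNO SDOS
instance (SUNO : List Int) (SDOS : List Int) (out : Int) : Decidable (Spec_intercambios SUNO SDOS out) := by unfold Spec_intercambios; infer_instance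

-- ===== CLAIM (what is proved, stated in full; the proofs are below) =====
def Claim_equal_intercambios : Prop := ∀ (SUNO : List Int) (SDOS : List Int), Dom_intercambios SUNO SDOS → Spec_intercambios SUNO SDOS (intercambios SUNO SDOS)

-- ===== LEMMAS AND PROOFS =====

-- set(xs) is a permutation of Mathlib's dedup (both are the distinct elements of xs)
theorem ofList_perm_dedup (xs : List Int) : (PySem.Set.ofList xs).Perm xs.dedup := by
  rw [List.perm_ext_iff_of_nodup (PySem.Set.nodup_ofList xs) xs.nodup_dedup]
  intro a; simp [PySem.Set.mem_ofList]

-- summing the multiplicities of the distinct elements satisfying p counts the elements satisfying p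
theorem sum_count_set (xs : List Int) (p : Int → Bool) :
    (((PySem.Set.ofList xs).filter p).map (fun k => (xs.count k : Int))).sum = (xs.countP p : Int) := by
  rw [List.Perm.sum_eq (((ofList_perm_dedup xs).filter p).map _)]
  have h := List.sum_map_count_dedup_filter_eq_countP p xs
  calc ((xs.dedup.filter p).map (fun k => (xs.count k : Int))).sum
      = (((xs.dedup.filter p).map (fun k => xs.count k)).map (Nat.cast : Nat → Int)).sum := by
        rw [List.map_map]; rfl
    _ = (xs.countP p : Int) := by rw [← Nat.cast_list_sum, h]

-- B's per-side sum equals A's per-side count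
theorem side_sum_eq (xs ys : List Int) :
    ((((PySem.Dict.counter xs).items.filter
        (fun p => !((PySem.Dict.counter ys).contains p.1))).map (·.2)).sum : Int)
      = (xs.countP (fun s => !(ys.contains s)) : Int) := by
  simp only [PySem.Dict.items_counter, PySem.Dict.contains_counter]
  rw [List.filter_map, List.map_map]
  exact sum_count_set xs _

-- ===== VERDICT (by name: the statement is the Claim_ definition above) =====
theorem intercambios_spec : Claim_equal_intercambios := by
  intro SUNO SDOS _
  unfold Spec_intercambios intercambios intercambios_alt
  simp only [PySem.Dict.foldl_insert_getD_add_one_eq_counter,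
    PySem.List.foldl_if_add_one, zero_add, side_sum_eq]
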